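-- pv_equiv track=rewrite | github.com/josevicenteayala/GitHubCourse | step-02-chat-explain-fix-generate/exercise.py | parse_scoreboard
-- ===== SOURCE A (Python) =====
-- def parse_scoreboard(raw: str) -> dict[str, int]:
--     """Parse 'name:score' pairs separated by commas.
--
--     Example: "alice:10,bob:9,alice:14" -> {"alice": 14, "bob": 9}
--
--     Invalid segments should be skipped.
--     """
--     board: dict[str, int] = {}
--     if raw == "":
--         return board
--
--     parts = raw.split(",")
--     for part in parts:
--         if ":" not in part:
--             continue
--         name, score = part.split(":", 1)
--         name = name.strip().lower()
--         score = score.strip()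
--         try:
--             value = int(score)
--         except ValueError:
--             continue
--         if name in board:
--             board[name] = max(board[name], value)
--         else:
--             board[name] = value
--     return board
-- ===== SOURCE B (Python) =====
-- def parse_scoreboard(raw: str) -> dict[str, int]:
--     # Phase 1: collect every valid value per (normalized) name, in first-appearance order.
--     groups: dict[str, list[int]] = {}
--     for part in raw.split(","):
--         if ":" not in part:
--             continue
--         name, score = part.split(":", 1)
--         try:
--             value = int(score.strip())
--         except ValueError:
--             continue
--         groups.setdefault(name.strip().lower(), []).append(value)
--     # Phase 2: the board is the max of each group.
--     return {name: max(values) for name, values in groups.items()}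
-- ===== Notes on version B (the rewrite author's own statement) =====
-- stated objective: alternative
-- what changed: A keeps one running-max dict updated as it scans; B first groups every valid value into per-name lists (setdefault/append) and afterwards builds the board as a comprehension taking max of each group, dropping A's redundant empty-string guard.
import Mathlib
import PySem

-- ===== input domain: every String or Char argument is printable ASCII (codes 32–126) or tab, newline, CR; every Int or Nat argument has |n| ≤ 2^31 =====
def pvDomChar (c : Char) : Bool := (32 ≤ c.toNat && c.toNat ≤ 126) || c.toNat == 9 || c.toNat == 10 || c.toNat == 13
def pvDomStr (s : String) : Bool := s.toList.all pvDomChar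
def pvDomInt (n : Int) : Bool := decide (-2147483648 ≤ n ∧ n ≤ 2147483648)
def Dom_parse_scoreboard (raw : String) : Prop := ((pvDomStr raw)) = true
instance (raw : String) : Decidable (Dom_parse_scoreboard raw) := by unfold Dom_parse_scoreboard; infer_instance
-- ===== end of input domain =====

-- B restructures A: instead of one running-max dict it groups all valid values per name and takes max per group at the end; same results, same cost.

-- ===== PORT A =====
-- one loop step of A; board[name] under the contains-guard is getD name 0
def pvStepA (d : PySem.Dict String Int) (part : String) : PySem.Dict String Int :=
  if PySem.Str.isIn ":" part = false then d
  else
    match PySem.Str.splitMax? part ":" 1 with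
    | some [n, s] =>
      let name := PySem.Str.lower (PySem.Str.strip n)
      let score := PySem.Str.strip s
      match PySem.Int.ofStr? score with
      | none => d
      | some v =>
        if d.contains name then d.insert name (max (d.getD name 0) v)
        else d.insert name v
    | _ => d

def parse_scoreboard (raw : String) : List (String × Int) :=
  if raw = "" then (PySem.Dict.empty : PySem.Dict String Int).items
  else (((PySem.Str.split? raw ",").getD []).foldl pvStepA PySem.Dict.empty).items

-- ===== PORT B =====
-- one loop step of B: groups.setdefault(name,[]).append(value)
def pvStepB (g : PySem.Dict String (List Int)) (part : String) : PySem.Dict String (List Int) :=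
  if PySem.Str.isIn ":" part = false then g
  else
    match PySem.Str.splitMax? part ":" 1 with
    | some [n, s] =>
      match PySem.Int.ofStr? (PySem.Str.strip s) with
      | none => g
      | some v => g.modify (PySem.Str.lower (PySem.Str.strip n)) [] (· ++ [v])
    | _ => g

def parse_scoreboard_alt (raw : String) : List (String × Int) :=
  let groups := ((PySem.Str.split? raw ",").getD []).foldl pvStepB PySem.Dict.empty
  groups.items.map (fun p => (p.1, (PySem.List.max? p.2 (fun y => y)).getD 0))

-- ===== PRECONDITION & SPEC =====
def Spec_parse_scoreboard (raw : String) (out : List (String × Int)) : Prop := out = parse_scoreboard_alt raw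
instance (raw : String) (out : List (String × Int)) : Decidable (Spec_parse_scoreboard raw out) := by unfold Spec_parse_scoreboard; infer_instance

-- ===== CLAIM (what is proved, stated in full; the proofs are below) =====
def Claim_equal_parse_scoreboard : Prop := ∀ (raw : String), Dom_parse_scoreboard raw → Spec_parse_scoreboard raw (parse_scoreboard raw)

-- ===== LEMMAS AND PROOFS =====

-- the common per-segment parser (proof-only; the ports do not use it)
def pvParse (part : String) : Option (String × Int) :=
  if PySem.Str.isIn ":" part = false then none
  else
    match PySem.Str.splitMax? part ":" 1 with
    | some [n, s] =>
      match PySem.Int.ofStr? (PySem.Str.strip s) with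
      | none => none
      | some v => some (PySem.Str.lower (PySem.Str.strip n), v)
    | _ => none

def pvStepA' (d : PySem.Dict String Int) (p : String × Int) : PySem.Dict String Int :=
  d.insert p.1 (if d.contains p.1 then max (d.getD p.1 0) p.2 else p.2)

def pvStepB' (g : PySem.Dict String (List Int)) (p : String × Int) : PySem.Dict String (List Int) :=
  g.modify p.1 [] (· ++ [p.2])

theorem pvStepA_eq (d : PySem.Dict String Int) (part : String) :
    pvStepA d part = (match pvParse part with | none => d | some p => pvStepA' d p) := by
  unfold pvStepA pvParse pvStepA'
  split
  · rfl
  · rcases h : PySem.Str.splitMax? part ":" 1 with _ | ⟨_ | ⟨n, _ | ⟨s, _ | _⟩⟩⟩ <;> simp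
    rcases PySem.Int.ofStr? (PySem.Str.strip s) with _ | v <;> simp
    split <;> simp

theorem pvStepB_eq (g : PySem.Dict String (List Int)) (part : String) :
    pvStepB g part = (match pvParse part with | none => g | some p => pvStepB' g p) := by
  unfold pvStepB pvParse pvStepB'
  split
  · rfl
  · rcases h : PySem.Str.splitMax? part ":" 1 with _ | ⟨_ | ⟨n, _ | ⟨s, _ | _⟩⟩⟩ <;> simp
    rcases PySem.Int.ofStr? (PySem.Str.strip s) with _ | v <;> simp

theorem pvFoldl_filterMap {γ : Type} (f : γ → String × Int → γ)
    (step : γ → String → γ)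
    (hstep : ∀ d part, step d part = (match pvParse part with | none => d | some p => f d p))
    (l : List String) (d : γ) :
    l.foldl step d = (l.filterMap pvParse).foldl f d := by
  induction l generalizing d with
  | nil => rfl
  | cons a t ih =>
    simp only [List.foldl_cons, List.filterMap_cons, hstep d a]
    cases pvParse a <;> simp [ih]

-- A's dict lookup after the fold: a running max over the values under key c
theorem pvA_get? (l : List (String × Int)) (d : PySem.Dict String Int) (c : String) :
    (l.foldl pvStepA' d).get? c =
      match d.get? c with
      | some w => some (((l.filter (fun p => p.1 == c)).map (·.2)).foldl max w)
      | none =>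
        match (l.filter (fun p => p.1 == c)).map (·.2) with
        | [] => none
        | x :: t => some (t.foldl max x) := by
  induction l generalizing d with
  | nil => cases h : d.get? c <;> simp [h]
  | cons p t ih =>
    rw [List.foldl_cons, ih]
    by_cases hpc : p.1 = c
    · subst hpc
      rw [List.filter_cons_of_pos (by simp)]
      cases h : d.get? p.1 with
      | some w =>
        have hc : d.contains p.1 = true := by
          rw [PySem.Dict.contains_eq_isSome_get?, h]; rfl
        have hg : d.getD p.1 0 = w := PySem.Dict.getD_of_get?_eq_some d 0 h
        have h' : (pvStepA' d p).get? p.1 = some (max w p.2) := by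
          simp [pvStepA', hc, hg, PySem.Dict.get?_insert_self]
        rw [h']
        simp
      | none =>
        have hc : d.contains p.1 = false := by
          rw [PySem.Dict.contains_eq_isSome_get?, h]; rfl
        have h' : (pvStepA' d p).get? p.1 = some p.2 := by
          simp [pvStepA', hc, PySem.Dict.get?_insert_self]
        rw [h']
        simp
    · have hf : (p.1 == c) = false := by simpa using hpc
      rw [List.filter_cons_of_neg (by simp [hf])]
      have h' : (pvStepA' d p).get? c = d.get? c :=
        PySem.Dict.get?_insert_of_ne d _ (fun h => hpc h.symm)
      rw [h']

-- items of a nodup-keyed dict, reconstructed from keys and getD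
theorem pvItems_eq_keys_map {κ ν : Type} [BEq κ] [LawfulBEq κ]
    (d : PySem.Dict κ ν) (h : d.keys.Nodup) (d0 : ν) :
    d.items = d.keys.map (fun k => (k, d.getD k d0)) := by
  have hk : d.keys = d.items.map (fun p => p.1) := by simp only [PySem.Dict.keys]
  rw [hk, List.map_map]
  conv_lhs => rw [← List.map_id d.items]
  apply List.map_congr_left
  intro p hp
  have h1 : d.get? p.1 = some p.2 :=
    PySem.Dict.get?_of_mem_items d (by simpa using hp) h
  have h2 := PySem.Dict.getD_of_get?_eq_some d d0 h1
  simp [h2]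

theorem pvUpdate_nil {α : Type} [BEq α] (xs : List α) :
    PySem.Set.update ([] : PySem.Set α) xs = PySem.Set.ofList xs := by
  rw [PySem.Set.ofList_eq_foldl]; rfl

-- the core equivalence, on the already-parsed pair list
theorem pvMain (pairs : List (String × Int)) :
    (pairs.foldl pvStepA' PySem.Dict.empty).items
      = (pairs.foldl pvStepB' PySem.Dict.empty).items.map
          (fun p => (p.1, (PySem.List.max? p.2 (fun y => y)).getD 0)) := by
  have hkA : (pairs.foldl pvStepA' PySem.Dict.empty).keys
      = PySem.Set.ofList (pairs.map (fun p => p.1)) := by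
    rw [show pvStepA' = (fun (d : PySem.Dict String Int) (x : String × Int) =>
        d.insert x.1 (if d.contains x.1 then max (d.getD x.1 0) x.2 else x.2)) from rfl,
      PySem.Dict.keys_foldl_insert_key]
    simp [pvUpdate_nil]
  have hkB : (pairs.foldl pvStepB' PySem.Dict.empty).keys
      = PySem.Set.ofList (pairs.map (fun p => p.1)) := by
    rw [show pvStepB' = (fun (g : PySem.Dict String (List Int)) (x : String × Int) =>
        g.modify x.1 [] (fun l => l ++ [x.2])) from rfl,
      PySem.Dict.keys_foldl_modify_key]
    simp [pvUpdate_nil]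
  have hnA : (pairs.foldl pvStepA' PySem.Dict.empty).keys.Nodup := by
    rw [hkA]; exact PySem.Set.nodup_ofList _
  have hnB : (pairs.foldl pvStepB' PySem.Dict.empty).keys.Nodup := by
    rw [hkB]; exact PySem.Set.nodup_ofList _
  rw [pvItems_eq_keys_map _ hnA 0, pvItems_eq_keys_map _ hnB [], List.map_map, hkA, hkB]
  apply List.map_congr_left
  intro k hk
  have hmem : k ∈ pairs.map (fun p => p.1) := (PySem.Set.mem_ofList _ _).mp hk
  have hvals : (pairs.foldl pvStepB' PySem.Dict.empty).getD k []
      = ((pairs.filter (fun p => p.1 == k)).map (fun p => p.2)) := by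
    rw [show pvStepB' = (fun (g : PySem.Dict String (List Int)) (x : String × Int) =>
        g.modify x.1 [] (fun l => l ++ [x.2])) from rfl,
      PySem.Dict.getD_foldl_modify_append]
    simp
  have hne : ((pairs.filter (fun p => p.1 == k)).map (fun p => p.2)) ≠ [] := by
    rcases List.mem_map.mp hmem with ⟨p, hp, hpk⟩
    have : p ∈ pairs.filter (fun p => p.1 == k) :=
      List.mem_filter.mpr ⟨hp, by simp [hpk]⟩
    simp only [ne_eq, List.map_eq_nil_iff, List.filter_eq_nil_iff]
    intro h; exact h p hp (by simp [hpk])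
  rcases hx : (pairs.filter (fun p => p.1 == k)).map (fun p => p.2) with _ | ⟨x, t⟩
  · exact absurd hx hne
  · have hA : (pairs.foldl pvStepA' PySem.Dict.empty).getD k 0 = t.foldl max x := by
      apply PySem.Dict.getD_of_get?_eq_some
      rw [pvA_get?]
      simp [PySem.Dict.get?_empty, hx]
    simp [hA, hvals, hx, PySem.List.max?_id_cons]

theorem parse_scoreboard_spec : Claim_equal_parse_scoreboard := by
  intro raw _
  unfold Spec_parse_scoreboard parse_scoreboard parse_scoreboard_alt
  by_cases h : raw = ""
  · subst h; decide
  · rw [if_neg h,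
      pvFoldl_filterMap pvStepA' pvStepA pvStepA_eq,
      pvFoldl_filterMap pvStepB' pvStepB pvStepB_eq]
    exact pvMain _
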